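-- pv_equiv track=rewrite | github.com/stefanoleggio/entity-authentication-security | attack_task_3.py | find_best_r
-- ===== SOURCE A (Python) =====
-- def find_best_r(p):
--     r_prob = []
--     r_values = []
--     for r_1 in range(0,p+1):
--         r = 0
--         for digit in str(r_1):
--             r += int(digit)
--
--         found = False
--         for i in range(len(r_values)):
--             if(r_values[i] == r):
--                 r_prob[i] += 1
--                 found = True
--         if(found == False):
--             r_values.append(r)
--             r_prob.append(1)
--
--     # Reorder list
--
--     r_prob,r_values = list(zip(*sorted(zip(r_prob, r_values))))
--
--     return (r_values)
-- ===== SOURCE B (Python) =====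
-- def _dsum(n):
--     return n if n < 10 else n % 10 + _dsum(n // 10)
--
--
-- def _dist(p):
--     # digit-sum s -> how many n in [0, p] have digit sum s, by digit DP:
--     # n = 10*t + d with t in [0, p//10 - 1], d in 0..9, plus t = p//10, d in 0..p%10.
--     if p < 0:
--         return {}
--     q, r = divmod(p, 10)
--     sub = _dist(q - 1)
--     res = {}
--     for d in range(10):
--         for s, c in sub.items():
--             res[s + d] = res.get(s + d, 0) + c
--     base = _dsum(q)
--     for d in range(r + 1):
--         res[base + d] = res.get(base + d, 0) + 1
--     return res
--
--
-- def find_best_r(p):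
--     return [s for c, s in sorted((c, s) for s, c in _dist(p).items())]
-- ===== Notes on version B (the rewrite author's own statement) =====
-- stated objective: faster
-- what changed: A scans every integer 0..p, digit-summing each via str and rescanning its seen-values list; B never enumerates the integers: a digit DP recurses on p//10, building the digit-sum distribution of [0,p] by convolving the distribution of the shorter prefix range with the ten possible last digits, then sorts the (count, sum) pairs once.
-- crash fix: For p < 0 Python A raises ValueError (unpacking zip(*sorted([])) of the empty pair list) while B returns []. — e.g. on find_best_r(-1): A raises ValueError, B returns []
import Mathlib
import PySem

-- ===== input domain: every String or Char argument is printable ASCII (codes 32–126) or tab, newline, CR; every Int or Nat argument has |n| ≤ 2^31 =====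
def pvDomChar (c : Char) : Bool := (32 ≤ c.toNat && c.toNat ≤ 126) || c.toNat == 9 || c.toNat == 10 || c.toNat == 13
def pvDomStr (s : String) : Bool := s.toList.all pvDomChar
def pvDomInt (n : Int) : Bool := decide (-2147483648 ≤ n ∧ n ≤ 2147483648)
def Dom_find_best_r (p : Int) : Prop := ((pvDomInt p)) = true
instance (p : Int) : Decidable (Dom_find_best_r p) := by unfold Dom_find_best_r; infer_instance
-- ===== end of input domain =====

-- B replaces A's scan of every integer in [0, p] (digit sum via str plus a rescans of the
-- seen-values list) by a digit DP recursing on p // 10; measured asymptotically faster.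

-- ===== PORT A =====
-- int(digit) for one char; in both programs the char is a digit of str(n), n ≥ 0, so parsing never fails
def pyDigitInt (c : Char) : Int := (PySem.Int.ofChars? [c]).getD 0

-- loop body of A: digit sum via str, inner scan over r_values incrementing r_prob, append if unseen
-- (indices i come from range(len(r_values)) and r_prob always has that same length, so the
--  getD 0 default inside set is never consulted — Python's r_prob[i] never raises here)
def aStep (st : List Int × List Int) (r1 : Int) : List Int × List Int :=
  let r := (PySem.Int.toChars r1).foldl (fun acc digit => acc + pyDigitInt digit) 0
  let inner := (List.range st.2.length).foldl
    (fun (st2 : List Int × Bool) i =>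
      if st.2[i]? = some r then (st2.1.set i (st2.1.getD i 0 + 1), true) else st2)
    (st.1, false)
  if inner.2 = false then (inner.1 ++ [1], st.2 ++ [r]) else (inner.1, st.2)

def find_best_r (p : Int) : List Int :=
  let st := (PySem.List.pyRange 0 (p + 1) 1).foldl aStep ([], [])
  -- r_prob,r_values = list(zip(*sorted(zip(r_prob, r_values)))); return r_values
  -- (zip(*…) raises ValueError on the empty list, i.e. for negative p: excluded by Pre_)
  (PySem.List.sorted2 (st.1.zip st.2) Prod.fst Prod.snd false).map Prod.snd

-- ===== PORT B =====
-- _dsum(n) of Source B; the Nat fuel only makes the recursion structural (n//10 shrinks n),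
-- it is always sufficient and never changes the computed value
def bdsumFuel : Nat → Int → Int
  | 0, n => n
  | f + 1, n => if n < 10 then n else PySem.Int.mod n 10 + bdsumFuel f (PySem.Int.floordiv n 10)

def bdsum (n : Int) : Int := bdsumFuel (n.toNat + 1) n

-- _dist(p) of Source B: digit-sum -> how many n in [0, p] have that digit sum, recursing on p//10 - 1
-- (again the fuel is merely a structural bound on the recursion depth, always sufficient)
def bdistFuel : Nat → Int → PySem.Dict Int Int
  | 0, _ => PySem.Dict.empty
  | f + 1, p =>
    if p < 0 then PySem.Dict.empty
    else
      let q := PySem.Int.floordiv p 10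
      let r := PySem.Int.mod p 10
      let sub := bdistFuel f (q - 1)
      let res := (PySem.List.pyRange 0 10 1).foldl
        (fun res d => sub.items.foldl
          (fun res sc => res.insert (sc.1 + d) (res.getD (sc.1 + d) 0 + sc.2)) res)
        PySem.Dict.empty
      let base := bdsum q
      (PySem.List.pyRange 0 (r + 1) 1).foldl
        (fun res d => res.insert (base + d) (res.getD (base + d) 0 + 1)) res

def bdist (p : Int) : PySem.Dict Int Int := bdistFuel ((p + 1).toNat + 1) p

def find_best_r_alt (p : Int) : List Int :=
  (PySem.List.sorted2 ((bdist p).items.map (fun sc => (sc.2, sc.1))) Prod.fst Prod.snd false).map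
    Prod.snd

-- ===== PRECONDITION & SPEC =====
-- Pre_ excludes exactly the negative p, where Python A raises ValueError unpacking zip(*sorted([])) of the empty list.
def Pre_find_best_r (p : Int) : Prop := 0 ≤ p
instance (p : Int) : Decidable (Pre_find_best_r p) := by unfold Pre_find_best_r; infer_instance
def pvWitness_find_best_r : Int := (3)

-- For p < 0 Python A raises ValueError (unpacking zip(*sorted([])) of the empty pair list) while B returns [].
def Raises_find_best_r (p : Int) : Prop := p < 0
instance (p : Int) : Decidable (Raises_find_best_r p) := by unfold Raises_find_best_r; infer_instance
def pvRaiseWitness_find_best_r : Int := (-1)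
def pvRaiseWitnessOut_find_best_r : List Int := []

def Spec_find_best_r (p : Int) (out : List Int) : Prop := out = find_best_r_alt p
instance (p : Int) (out : List Int) : Decidable (Spec_find_best_r p out) := by unfold Spec_find_best_r; infer_instance

-- ===== CLAIM (what is proved, stated in full; the proofs are below) =====
def Claim_equal_find_best_r : Prop := ∀ (p : Int), Dom_find_best_r p → Pre_find_best_r p → Spec_find_best_r p (find_best_r p)
def Claim_raises_find_best_r : Prop := (∀ (p : Int), Dom_find_best_r p → Raises_find_best_r p → ¬ Pre_find_best_r p) ∧ (Dom_find_best_r (pvRaiseWitness_find_best_r) ∧ Raises_find_best_r (pvRaiseWitness_find_best_r) ∧ find_best_r_alt (pvRaiseWitness_find_best_r) = pvRaiseWitnessOut_find_best_r)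

-- ===== LEMMAS AND PROOFS =====

-- ---------- fuel invariance and derived equations for B's two recursions ----------

theorem bdsumFuel_congr : ∀ (f g : Nat) (n : Int), n.toNat < f → n.toNat < g →
    bdsumFuel f n = bdsumFuel g n := by
  intro f
  induction f with
  | zero => intro g n h; omega
  | succ f ih =>
    intro g n hf hg
    match g, hg with
    | g + 1, hg =>
      simp only [bdsumFuel]
      by_cases h10 : n < 10
      · simp [h10]
      · rw [if_neg h10, if_neg h10]
        have hq : PySem.Int.floordiv n 10 = n / 10 := PySem.Int.floordiv_eq_ediv_of_pos (by norm_num)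
        rw [hq, ih g (n / 10) (by omega) (by omega)]

theorem bdsum_eq_fuel (n : Int) (g : Nat) (h : n.toNat < g) : bdsum n = bdsumFuel g n := by
  unfold bdsum
  exact bdsumFuel_congr (n.toNat + 1) g n (by omega) h

theorem bdsumFuel_succ (f : Nat) (n : Int) : bdsumFuel (f + 1) n =
    if n < 10 then n else PySem.Int.mod n 10 + bdsumFuel f (PySem.Int.floordiv n 10) := rfl

theorem bdsum_eq (n : Int) : bdsum n =
    if n < 10 then n else PySem.Int.mod n 10 + bdsum (PySem.Int.floordiv n 10) := by
  rw [bdsum_eq_fuel n (n.toNat + 2) (by omega), bdsumFuel_succ]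
  by_cases h10 : n < 10
  · simp [h10]
  · rw [if_neg h10, if_neg h10]
    have hq : PySem.Int.floordiv n 10 = n / 10 := PySem.Int.floordiv_eq_ediv_of_pos (by norm_num)
    rw [hq, ← bdsum_eq_fuel (n / 10) (n.toNat + 1) (by omega)]

theorem bdistFuel_congr : ∀ (f g : Nat) (p : Int), (p + 1).toNat < f → (p + 1).toNat < g →
    bdistFuel f p = bdistFuel g p := by
  intro f
  induction f with
  | zero => intro g n h; omega
  | succ f ih =>
    intro g p hf hg
    match g, hg with
    | g + 1, hg =>
      simp only [bdistFuel]
      by_cases hneg : p < 0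
      · simp [hneg]
      · rw [if_neg hneg, if_neg hneg]
        have hq : PySem.Int.floordiv p 10 = p / 10 := PySem.Int.floordiv_eq_ediv_of_pos (by norm_num)
        rw [hq, ih g (p / 10 - 1) (by omega) (by omega)]

theorem bdistFuel_succ (f : Nat) (p : Int) : bdistFuel (f + 1) p =
    if p < 0 then PySem.Dict.empty
    else
      (PySem.List.pyRange 0 (PySem.Int.mod p 10 + 1) 1).foldl
        (fun res d => res.insert (bdsum (PySem.Int.floordiv p 10) + d)
          (res.getD (bdsum (PySem.Int.floordiv p 10) + d) 0 + 1))
        ((PySem.List.pyRange 0 10 1).foldl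
          (fun res d => (bdistFuel f (PySem.Int.floordiv p 10 - 1)).items.foldl
            (fun res sc => res.insert (sc.1 + d) (res.getD (sc.1 + d) 0 + sc.2)) res)
          PySem.Dict.empty) := rfl

theorem bdist_eq_fuel (p : Int) (g : Nat) (h : (p + 1).toNat < g) : bdist p = bdistFuel g p := by
  unfold bdist
  exact bdistFuel_congr ((p + 1).toNat + 1) g p (by omega) h

theorem bdist_eq (p : Int) : bdist p =
    if p < 0 then PySem.Dict.empty
    else
      (PySem.List.pyRange 0 (PySem.Int.mod p 10 + 1) 1).foldl
        (fun res d => res.insert (bdsum (PySem.Int.floordiv p 10) + d)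
          (res.getD (bdsum (PySem.Int.floordiv p 10) + d) 0 + 1))
        ((PySem.List.pyRange 0 10 1).foldl
          (fun res d => (bdist (PySem.Int.floordiv p 10 - 1)).items.foldl
            (fun res sc => res.insert (sc.1 + d) (res.getD (sc.1 + d) 0 + sc.2)) res)
          PySem.Dict.empty) := by
  rw [bdist_eq_fuel p ((p + 1).toNat + 2) (by omega), bdistFuel_succ]
  by_cases hneg : p < 0
  · simp [hneg]
  · rw [if_neg hneg, if_neg hneg,
      ← bdist_eq_fuel (PySem.Int.floordiv p 10 - 1) ((p + 1).toNat + 1) (by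
        rw [PySem.Int.floordiv_eq_ediv_of_pos (by norm_num : (0:Int) < 10)]; omega)]

-- ---------- basic digit-sum facts ----------

theorem bdsum_small {n : Int} (h : n < 10) : bdsum n = n := by
  rw [bdsum_eq, if_pos h]

theorem bdsum_split (t d : Int) (ht : 0 ≤ t) (hd0 : 0 ≤ d) (hd : d < 10) :
    bdsum (10 * t + d) = bdsum t + d := by
  by_cases h0 : t = 0
  · subst h0
    rw [show (10 * 0 + d : Int) = d by ring, bdsum_small hd, bdsum_small (by norm_num), zero_add]
  · have ht1 : 1 ≤ t := by omega
    rw [bdsum_eq, if_neg (by omega)]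
    have hq : PySem.Int.floordiv (10 * t + d) 10 = t := by
      rw [PySem.Int.floordiv_eq_ediv_of_pos (by norm_num)]; omega
    have hr : PySem.Int.mod (10 * t + d) 10 = d := by
      rw [PySem.Int.mod_eq_emod_of_pos (by norm_num)]; omega
    rw [hq, hr]; ring

-- ---------- sorted2 determinism ----------

def lexLt (a b : Int × Int) : Prop := a.1 < b.1 ∨ (a.1 = b.1 ∧ a.2 < b.2)

def bfS (a b : Int × Int) : Bool :=
  decide (a.1 < b.1) || (!decide (b.1 < a.1) && decide (a.2 < b.2))

theorem sorted2_eq_foldl (xs : List (Int × Int)) :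
    PySem.List.sorted2 xs Prod.fst Prod.snd false
      = xs.foldl (fun acc x => PySem.List.insertBy bfS x acc) [] := rfl

theorem insertBy_nil (bf : Int × Int → Int × Int → Bool) (x : Int × Int) :
    PySem.List.insertBy bf x [] = [x] := rfl

theorem insertBy_cons (bf : Int × Int → Int × Int → Bool) (x y : Int × Int)
    (ys : List (Int × Int)) :
    PySem.List.insertBy bf x (y :: ys)
      = if bf x y = true then x :: y :: ys else y :: PySem.List.insertBy bf x ys := rfl

theorem bfS_iff (a b : Int × Int) : bfS a b = true ↔ lexLt a b := by
  simp only [bfS, lexLt, Bool.or_eq_true, Bool.and_eq_true, Bool.not_eq_true', decide_eq_true_eq,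
    decide_eq_false_iff_not]
  omega

theorem lexLt_asymm {a b : Int × Int} (h : lexLt a b) : ¬ lexLt b a := by
  simp only [lexLt] at *; omega

theorem lexLt_trans {a b c : Int × Int} (h1 : lexLt a b) (h2 : lexLt b c) : lexLt a c := by
  simp only [lexLt] at *; omega

theorem lexLt_total {a b : Int × Int} (hne : a ≠ b) (h : ¬ lexLt b a) : lexLt a b := by
  rcases a with ⟨a1, a2⟩; rcases b with ⟨b1, b2⟩
  simp only [Ne, Prod.mk.injEq, not_and] at hne
  simp only [lexLt, not_or, not_and] at *
  by_cases h1 : a1 = b1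
  · subst h1
    refine Or.inr ⟨rfl, ?_⟩
    rcases h with ⟨-, h2⟩
    have := hne rfl
    omega
  · omega

theorem pairwise_insertBy (x : Int × Int) (l : List (Int × Int))
    (hl : l.Pairwise (fun a b => ¬ lexLt b a)) :
    (PySem.List.insertBy bfS x l).Pairwise (fun a b => ¬ lexLt b a) := by
  induction l with
  | nil => rw [insertBy_nil]; simp
  | cons y ys ih =>
    rcases List.pairwise_cons.mp hl with ⟨hy, hys⟩
    rw [insertBy_cons]
    by_cases h : bfS x y = true
    · rw [if_pos h]
      have hxy : lexLt x y := (bfS_iff x y).mp h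
      refine List.pairwise_cons.mpr ⟨?_, hl⟩
      intro z hz
      rcases List.mem_cons.mp hz with rfl | hz
      · exact lexLt_asymm hxy
      · intro hzx
        exact (hy z hz) (lexLt_trans hzx hxy)
    · rw [if_neg h]
      refine List.pairwise_cons.mpr ⟨?_, ih hys⟩
      intro z hz
      rcases (PySem.List.mem_insertBy bfS x z ys).mp hz with rfl | hz
      · intro hxy
        exact h ((bfS_iff z y).mpr hxy)
      · exact hy z hz

theorem sorted2_pairwise_nge (xs : List (Int × Int)) :
    (PySem.List.sorted2 xs Prod.fst Prod.snd false).Pairwise (fun a b => ¬ lexLt b a) := by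
  rw [sorted2_eq_foldl]
  suffices h : ∀ acc : List (Int × Int), acc.Pairwise (fun a b => ¬ lexLt b a) →
      (xs.foldl (fun acc x => PySem.List.insertBy bfS x acc) acc).Pairwise
        (fun a b => ¬ lexLt b a) by
    exact h [] (by simp)
  induction xs with
  | nil => intro acc h; simpa using h
  | cons x xs ih =>
    intro acc h
    exact ih _ (pairwise_insertBy x acc h)

theorem uniq_lex : ∀ (ys zs : List (Int × Int)), zs.Perm ys →
    zs.Pairwise (fun a b => ¬ lexLt b a) → ys.Pairwise lexLt → zs = ys := by
  intro ys
  induction ys with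
  | nil => intro zs hp _ _; exact List.perm_nil.mp hp
  | cons b bs ih =>
    intro zs hp hz hy
    rcases List.pairwise_cons.mp hy with ⟨hb, hbs⟩
    match zs, hz, hp with
    | [], _, hp => exact absurd hp.symm (by simp)
    | a :: as, hz, hp =>
      rcases List.pairwise_cons.mp hz with ⟨ha, has⟩
      have hab : a = b := by
        have hamem : a ∈ b :: bs := hp.mem_iff.mp List.mem_cons_self
        rcases List.mem_cons.mp hamem with h | h
        · exact h
        · exfalso
          have hba : lexLt b a := hb a h
          have hbmem : b ∈ a :: as := hp.symm.mem_iff.mp List.mem_cons_self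
          rcases List.mem_cons.mp hbmem with h2 | h2
          · exact lexLt_asymm hba (h2 ▸ hba)
          · exact (ha b h2) hba
      subst hab
      rw [ih as hp.cons_inv has hbs]

theorem sorted2_congr_perm (xs xs' : List (Int × Int)) (h : xs.Perm xs') (hnd : xs'.Nodup) :
    PySem.List.sorted2 xs Prod.fst Prod.snd false
      = PySem.List.sorted2 xs' Prod.fst Prod.snd false := by
  have hys : (PySem.List.sorted2 xs' Prod.fst Prod.snd false).Perm xs' :=
    PySem.List.sorted2_perm xs' Prod.fst Prod.snd false
  have hzs : (PySem.List.sorted2 xs Prod.fst Prod.snd false).Perm xs :=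
    PySem.List.sorted2_perm xs Prod.fst Prod.snd false
  have hnd' : (PySem.List.sorted2 xs' Prod.fst Prod.snd false).Nodup := hys.nodup_iff.mpr hnd
  apply uniq_lex
  · exact hzs.trans (h.trans hys.symm)
  · exact sorted2_pairwise_nge xs
  · exact (hnd'.and (sorted2_pairwise_nge xs')).imp (fun hab => lexLt_total hab.1 hab.2)


-- ---------- str(n) digit characters vs the arithmetic digit sum ----------

def natDigits (n : Nat) : List Char :=
  if _h : n < 10 then [Nat.digitChar n] else natDigits (n / 10) ++ [Nat.digitChar (n % 10)]
termination_by n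
decreasing_by omega

theorem toDigitsCore_eq : ∀ (f n : Nat) (ds : List Char), 1 ≤ f → n < 10 ^ f →
    Nat.toDigitsCore 10 f n ds = natDigits n ++ ds := by
  intro f
  induction f with
  | zero => intro n ds h; omega
  | succ f ih =>
    intro n ds _ hn
    rw [show Nat.toDigitsCore 10 (f + 1) n ds
        = if n / 10 = 0 then Nat.digitChar (n % 10) :: ds
          else Nat.toDigitsCore 10 f (n / 10) (Nat.digitChar (n % 10) :: ds) from rfl]
    by_cases h0 : n / 10 = 0
    · have hn10 : n < 10 := by omega
      rw [if_pos h0, natDigits, dif_pos hn10, Nat.mod_eq_of_lt hn10]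
      rfl
    · have hn10 : ¬ n < 10 := by omega
      have hf1 : 1 ≤ f := by
        rcases Nat.lt_or_ge f 1 with h | h
        · interval_cases f
          · simp [pow_one] at hn; omega
        · exact h
      have hdiv : n / 10 < 10 ^ f := by
        rw [Nat.div_lt_iff_lt_mul (by norm_num)]
        calc n < 10 ^ (f + 1) := hn
          _ = 10 ^ f * 10 := by rw [pow_succ]
      rw [if_neg h0, ih (n / 10) (Nat.digitChar (n % 10) :: ds) hf1 hdiv]
      conv_rhs => rw [natDigits, dif_neg hn10]
      rw [List.append_assoc]
      rfl

theorem toDigits_eq (n : Nat) : Nat.toDigits 10 n = natDigits n := by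
  have h : n < 10 ^ (n + 1) :=
    lt_of_lt_of_le (Nat.lt_pow_self (by norm_num))
      (Nat.pow_le_pow_right (by norm_num) (Nat.le_succ n))
  have := toDigitsCore_eq (n + 1) n [] (by omega) h
  rw [show Nat.toDigits 10 n = Nat.toDigitsCore 10 (n + 1) n [] from rfl, this, List.append_nil]

theorem digit_val {d : Nat} (hd : d < 10) : pyDigitInt (Nat.digitChar d) = (d : Int) := by
  interval_cases d <;> decide

theorem natDigits_sum (m : Nat) : ((natDigits m).map pyDigitInt).sum = bdsum (m : Int) := by
  induction m using Nat.strong_induction_on with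
  | _ m ih =>
    by_cases h : m < 10
    · rw [natDigits, dif_pos h]
      simp only [List.map_cons, List.map_nil, List.sum_cons, List.sum_nil, add_zero]
      rw [digit_val h, bdsum_small (by exact_mod_cast h)]
    · rw [natDigits, dif_neg h]
      simp only [List.map_append, List.sum_append, List.map_cons, List.map_nil, List.sum_cons,
        List.sum_nil, add_zero]
      rw [ih (m / 10) (by omega), digit_val (Nat.mod_lt m (by norm_num))]
      have hm10 : ¬ ((m : Int) < 10) := by exact_mod_cast h
      have h1 : PySem.Int.floordiv (m : Int) 10 = ((m / 10 : Nat) : Int) := by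
        rw [PySem.Int.floordiv_eq_ediv_of_pos (by norm_num)]; omega
      have h2 : PySem.Int.mod (m : Int) 10 = ((m % 10 : Nat) : Int) := by
        rw [PySem.Int.mod_eq_emod_of_pos (by norm_num)]; omega
      conv_rhs => rw [bdsum_eq, if_neg hm10, h1, h2]
      ring

theorem strDsum_eq (n : Int) (hn : 0 ≤ n) :
    (PySem.Int.toChars n).foldl (fun acc c => acc + pyDigitInt c) 0 = bdsum n := by
  rw [PySem.List.foldl_add]
  rw [show PySem.Int.toChars n = Nat.toDigits 10 n.toNat from by
    simp [PySem.Int.toChars, not_lt.mpr hn]]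
  rw [toDigits_eq, natDigits_sum, Int.toNat_of_nonneg hn, zero_add]

-- ---------- counting loops on dicts ('res[k] = res.get(k, 0) + c') ----------

theorem bump_getD {α : Type} (l : List α) (k : α → Int) (v : α → Int)
    (dd : PySem.Dict Int Int) (s : Int) :
    (l.foldl (fun acc x => acc.insert (k x) (acc.getD (k x) 0 + v x)) dd).getD s 0
      = dd.getD s 0 + ((l.filter (fun x => k x == s)).map v).sum := by
  induction l generalizing dd with
  | nil => simp
  | cons x xs ih =>
    rw [List.foldl_cons, ih, PySem.Dict.getD_insert, List.filter_cons]
    by_cases h : s = k x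
    · rw [if_pos h, if_pos (by simp [h])]
      simp only [List.map_cons, List.sum_cons, h]
      omega
    · rw [if_neg h, if_neg (by simp; omega)]

theorem bump_contains {α : Type} (l : List α) (k : α → Int) (v : α → Int)
    (dd : PySem.Dict Int Int) (s : Int) :
    (l.foldl (fun acc x => acc.insert (k x) (acc.getD (k x) 0 + v x)) dd).contains s
      = (dd.contains s || l.any (fun x => k x == s)) := by
  induction l generalizing dd with
  | nil => simp
  | cons x xs ih =>
    rw [List.foldl_cons, ih, PySem.Dict.contains_insert, List.any_cons]
    have : (s == k x) = (k x == s) := by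
      rw [Bool.eq_iff_iff]; simp only [beq_iff_eq]; omega
    rw [this]
    cases k x == s <;> cases dd.contains s <;> simp

theorem bump_nodup {α : Type} (l : List α) (k : α → Int) (v : α → Int)
    (dd : PySem.Dict Int Int) (h : dd.keys.Nodup) :
    (l.foldl (fun acc x => acc.insert (k x) (acc.getD (k x) 0 + v x)) dd).keys.Nodup := by
  induction l generalizing dd with
  | nil => exact h
  | cons x xs ih =>
    rw [List.foldl_cons]
    exact ih _ (PySem.Dict.nodup_keys_insert _ _ _ h)

theorem filter_key_pairs (l : List (Int × Int)) (x c : Int)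
    (hnd : (l.map Prod.fst).Nodup) (hm : (x, c) ∈ l) :
    l.filter (fun kv => kv.1 == x) = [(x, c)] := by
  induction l with
  | nil => cases hm
  | cons kv tl ih =>
    simp only [List.map_cons, List.nodup_cons] at hnd
    obtain ⟨hx, hnd'⟩ := hnd
    rcases List.mem_cons.mp hm with heq | hm'
    · have hkv1 : kv.1 = x := by rw [← heq]
      rw [List.filter_cons, if_pos (by simp [hkv1])]
      have htl : tl.filter (fun kv => kv.1 == x) = [] := by
        rw [List.filter_eq_nil_iff]
        intro a ha hcon
        simp only [beq_iff_eq] at hcon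
        apply hx
        rw [hkv1, ← hcon]
        exact List.mem_map_of_mem ha
      rw [htl, ← heq]
    · have hxin : x ∈ tl.map Prod.fst := by
        have h' := List.mem_map_of_mem (f := Prod.fst) hm'
        simpa using h'
      have hkx : ¬ (kv.1 == x) = true := by
        simp only [beq_iff_eq]
        intro hcon
        exact hx (hcon ▸ hxin)
      rw [List.filter_cons, if_neg hkx]
      exact ih hnd' hm'

theorem sum_filter_key (dd : PySem.Dict Int Int) (x : Int) (hnd : dd.keys.Nodup) :
    ((dd.items.filter (fun kv => kv.1 == x)).map Prod.snd).sum = dd.getD x 0 := by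
  have hkeys : dd.keys = dd.items.map Prod.fst := by
    rw [PySem.Dict.keys.eq_1]
  by_cases hc : dd.contains x = true
  · have hx : x ∈ dd.items.map Prod.fst := by
      rw [← hkeys]; exact (PySem.Dict.contains_iff_mem_keys dd x).mp hc
    obtain ⟨kv, hkv, hfst⟩ := List.mem_map.mp hx
    have hmem : (x, kv.2) ∈ dd.items := by
      have : kv = (x, kv.2) := by rw [← hfst]
      exact this ▸ hkv
    rw [filter_key_pairs dd.items x kv.2 (hkeys ▸ hnd) hmem]
    simp only [List.map_cons, List.map_nil, List.sum_cons, List.sum_nil, add_zero]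
    exact (PySem.Dict.getD_of_mem_items dd hmem hnd 0).symm
  · have hnil : dd.items.filter (fun kv => kv.1 == x) = [] := by
      rw [List.filter_eq_nil_iff]
      intro kv hkv hcon
      apply hc
      rw [PySem.Dict.contains_iff_mem_keys, hkeys]
      simp only [beq_iff_eq] at hcon
      exact hcon ▸ List.mem_map_of_mem hkv
    rw [hnil, PySem.Dict.getD_of_not_contains dd 0 (by simpa using hc)]
    rfl

theorem inner_getD (sub : PySem.Dict Int Int) (hnd : sub.keys.Nodup)
    (X : PySem.Dict Int Int) (d s : Int) :
    (sub.items.foldl (fun acc sc => acc.insert (sc.1 + d) (acc.getD (sc.1 + d) 0 + sc.2)) X).getD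
        s 0
      = X.getD s 0 + sub.getD (s - d) 0 := by
  rw [bump_getD sub.items (fun sc => sc.1 + d) Prod.snd X s]
  congr 1
  rw [List.filter_congr (q := fun kv : Int × Int => kv.1 == s - d)
    (by intro kv _; rw [Bool.eq_iff_iff]; simp only [beq_iff_eq]; omega)]
  exact sum_filter_key sub (s - d) hnd

theorem inner_contains (sub X : PySem.Dict Int Int) (d s : Int) :
    (sub.items.foldl (fun acc sc => acc.insert (sc.1 + d) (acc.getD (sc.1 + d) 0 + sc.2))
        X).contains s
      = (X.contains s || sub.contains (s - d)) := by
  rw [bump_contains sub.items (fun sc => sc.1 + d) Prod.snd X s]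
  congr 1
  rw [Bool.eq_iff_iff, List.any_eq_true, PySem.Dict.contains_iff_mem_keys, PySem.Dict.keys.eq_1]
  constructor
  · rintro ⟨kv, hkv, hbeq⟩
    simp only [beq_iff_eq] at hbeq
    exact (show kv.1 = s - d by omega) ▸ List.mem_map_of_mem hkv
  · intro hm
    obtain ⟨kv, hkv, hfst⟩ := List.mem_map.mp hm
    exact ⟨kv, hkv, by simp only [beq_iff_eq]; omega⟩

theorem inner_nodup (sub X : PySem.Dict Int Int) (d : Int) (h : X.keys.Nodup) :
    (sub.items.foldl (fun acc sc => acc.insert (sc.1 + d) (acc.getD (sc.1 + d) 0 + sc.2))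
        X).keys.Nodup :=
  bump_nodup sub.items (fun sc => sc.1 + d) Prod.snd X h

-- ---------- the digit-sum counting function and its divide-by-10 recurrence ----------

def mN (N : Nat) (s : Int) : Nat := (List.range N).countP (fun t : Nat => bdsum (t : Int) == s)

theorem mN_succ (N : Nat) (s : Int) :
    mN (N + 1) s = mN N s + (if bdsum (N : Int) == s then 1 else 0) := by
  simp [mN, List.range_succ, List.countP_append, List.countP_singleton]

theorem part1 (q : Nat) (s : Int) :
    ((List.range (10 * q)).countP (fun n : Nat => bdsum (n : Int) == s) : Int)
      = ((List.range 10).map (fun d : Nat => (mN q (s - (d : Int)) : Int))).sum := by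
  induction q with
  | zero => simp [mN]
  | succ q ih =>
    have h1 : 10 * (q + 1) = 10 * q + 10 := by ring
    rw [h1, List.range_add, List.countP_append]
    push_cast
    rw [ih]
    have h2 : ((List.map (fun x => 10 * q + x) (List.range 10)).countP
          (fun n : Nat => bdsum (n : Int) == s) : Int)
        = ((List.range 10).map
            (fun d : Nat => if bdsum (q : Int) == s - (d : Int) then (1 : Int) else 0)).sum := by
      rw [List.countP_map,
        List.countP_congr (q := fun d : Nat => bdsum (q : Int) == s - (d : Int)) ?_]
      · exact (PySem.List.sum_map_ite_one_zero _ _).symm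
      · intro x hx
        have hx10 : x < 10 := List.mem_range.mp hx
        simp only [Function.comp, beq_iff_eq]
        have hc : ((10 * q + x : Nat) : Int) = 10 * (q : Int) + (x : Int) := by push_cast; ring
        rw [hc, bdsum_split (q : Int) (x : Int) (by positivity) (by positivity)
          (by exact_mod_cast hx10)]
        omega
    rw [h2]
    have h3 : ∀ d : Nat, (mN (q + 1) (s - (d : Int)) : Int)
        = (mN q (s - (d : Int)) : Int)
          + (if bdsum (q : Int) == s - (d : Int) then (1 : Int) else 0) := by
      intro d
      rw [mN_succ]
      push_cast
      rfl
    simp only [h3]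
    rw [PySem.List.sum_map_add_int]

theorem mREC (p : Int) (hp : 0 ≤ p) (s : Int) :
    (mN (p + 1).toNat s : Int)
      = ((List.range 10).map (fun d : Nat => (mN (p / 10).toNat (s - (d : Int)) : Int))).sum
        + ((PySem.List.pyRange 0 (p % 10 + 1) 1).countP
            (fun d => bdsum (p / 10) + d == s) : Int) := by
  have hsplit : (p + 1).toNat = 10 * (p / 10).toNat + ((p % 10).toNat + 1) := by omega
  rw [show mN (p + 1).toNat s
      = (List.range (p + 1).toNat).countP (fun t : Nat => bdsum (t : Int) == s) from rfl]
  rw [hsplit, List.range_add, List.countP_append]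
  push_cast
  rw [part1]
  congr 1
  have hpy : PySem.List.pyRange 0 (p % 10 + 1) 1
      = (List.range ((p % 10).toNat + 1)).map (fun k : Nat => (k : Int)) := by
    rw [show (p % 10 + 1 : Int) = (((p % 10).toNat + 1 : Nat) : Int) by omega,
      PySem.List.pyRange_zero_natCast]
  rw [hpy, List.countP_map, List.countP_map]
  rw [List.countP_congr (q := (fun d : Int => bdsum (p / 10) + d == s) ∘ (fun k : Nat => (k : Int)))
    ?_]
  intro x hx
  have hx' : x < (p % 10).toNat + 1 := List.mem_range.mp hx
  simp only [Function.comp, beq_iff_eq]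
  have hc : ((10 * (p / 10).toNat + x : Nat) : Int) = 10 * (p / 10) + (x : Int) := by
    push_cast; omega
  rw [hc, bdsum_split (p / 10) (x : Int) (by omega) (by omega) (by omega)]


theorem sum_map_one {α : Type} (l : List α) :
    (l.map (fun _ => (1 : Int))).sum = (l.length : Int) := by
  simp [List.map_const', List.sum_replicate]

-- ---------- the characterisation of bdist: it is the digit-sum counter of [0, p] ----------

theorem CHAR_neg (p : Int) (hneg : p < 0) :
    (bdist p).keys.Nodup ∧ ∀ s : Int,
      (bdist p).getD s 0 = (mN (p + 1).toNat s : Int)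
      ∧ ((bdist p).contains s = true ↔ mN (p + 1).toNat s ≠ 0) := by
  rw [bdist_eq, if_pos hneg]
  have h0 : (p + 1).toNat = 0 := by omega
  rw [h0]
  refine ⟨PySem.Dict.nodup_keys_empty, fun s => ⟨by simp [mN], by simp [mN]⟩⟩

theorem CHAR : ∀ (N : Nat) (p : Int), (p + 1).toNat ≤ N →
    (bdist p).keys.Nodup ∧ ∀ s : Int,
      (bdist p).getD s 0 = (mN (p + 1).toNat s : Int)
      ∧ ((bdist p).contains s = true ↔ mN (p + 1).toNat s ≠ 0) := by
  intro N
  induction N with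
  | zero => intro p hp; exact CHAR_neg p (by omega)
  | succ N ih =>
    intro p hp
    by_cases hneg : p < 0
    · exact CHAR_neg p hneg
    · have hp0 : 0 ≤ p := by omega
      have hq : PySem.Int.floordiv p 10 = p / 10 := PySem.Int.floordiv_eq_ediv_of_pos (by norm_num)
      have hr : PySem.Int.mod p 10 = p % 10 := PySem.Int.mod_eq_emod_of_pos (by norm_num)
      obtain ⟨hndS, hchS⟩ := ih (p / 10 - 1) (by omega)
      have hqt : (p / 10 - 1 + 1).toNat = (p / 10).toNat := by omega
      have hsubG : ∀ x : Int, (bdist (p / 10 - 1)).getD x 0 = (mN (p / 10).toNat x : Int) := by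
        intro x; rw [(hchS x).1, hqt]
      have hsubC : ∀ x : Int,
          (bdist (p / 10 - 1)).contains x = true ↔ mN (p / 10).toNat x ≠ 0 := by
        intro x; rw [(hchS x).2, hqt]
      rw [bdist_eq, if_neg (not_lt.mpr hp0), hq, hr]
      have h10 : PySem.List.pyRange 0 10 1 = [0, 1, 2, 3, 4, 5, 6, 7, 8, 9] := by decide
      rw [h10]
      simp only [List.foldl_cons, List.foldl_nil]
      refine ⟨?_, fun s => ⟨?_, ?_⟩⟩
      · apply bump_nodup
        repeat apply inner_nodup
        exact PySem.Dict.nodup_keys_empty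
      · rw [bump_getD (PySem.List.pyRange 0 (p % 10 + 1) 1) (fun d => bdsum (p / 10) + d)
          (fun _ => (1 : Int)) _ s]
        simp only [inner_getD (bdist (p / 10 - 1)) hndS]
        simp only [hsubG, PySem.Dict.getD_empty]
        rw [sum_map_one, ← List.countP_eq_length_filter]
        have hm := mREC p hp0 s
        have hR : List.range 10 = [0, 1, 2, 3, 4, 5, 6, 7, 8, 9] := by decide
        rw [hR] at hm
        simp only [List.map_cons, List.map_nil, List.sum_cons, List.sum_nil, add_zero,
          Nat.cast_ofNat, Nat.cast_zero, Nat.cast_one, sub_zero] at hm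
        simp only [sub_zero]
        omega
      · rw [bump_contains (PySem.List.pyRange 0 (p % 10 + 1) 1) (fun d => bdsum (p / 10) + d)
          (fun _ => (1 : Int)) _ s]
        simp only [inner_contains]
        simp only [PySem.Dict.contains_empty, Bool.false_or, Bool.or_eq_true, List.any_eq_true]
        simp only [hsubC]
        have hex : (∃ x ∈ PySem.List.pyRange 0 (p % 10 + 1) 1, (bdsum (p / 10) + x == s) = true)
            ↔ (PySem.List.pyRange 0 (p % 10 + 1) 1).countP
                (fun d => bdsum (p / 10) + d == s) ≠ 0 := by
          rw [Ne, List.countP_eq_zero]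
          push_neg
          simp
        rw [hex]
        have hm := mREC p hp0 s
        have hR : List.range 10 = [0, 1, 2, 3, 4, 5, 6, 7, 8, 9] := by decide
        rw [hR] at hm
        simp only [List.map_cons, List.map_nil, List.sum_cons, List.sum_nil, add_zero,
          Nat.cast_ofNat, Nat.cast_zero, Nat.cast_one, sub_zero] at hm
        simp only [sub_zero]
        omega

-- ---------- A's loop state versus a counting dict (carried over from the A port shape) ----------

def cntStep (d : PySem.Dict Int Int) (n : Int) : PySem.Dict Int Int :=
  let s := (PySem.Int.toChars n).foldl (fun acc digit => acc + pyDigitInt digit) 0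
  d.insert s (d.getD s 0 + 1)

theorem inner_char (vals : List Int) (r : Int) (probs : List Int) (m : Nat) :
    (List.range m).foldl
      (fun (st2 : List Int × Bool) i =>
        if vals[i]? = some r then (st2.1.set i (st2.1.getD i 0 + 1), true) else st2)
      (probs, false)
    = (probs.mapIdx (fun k x => if k < m ∧ vals[k]? = some r then x + 1 else x),
       decide (∃ i, i < m ∧ vals[i]? = some r)) := by
  induction m with
  | zero =>
    simp only [List.range_zero, List.foldl_nil]
    refine Prod.ext ?_ ?_
    · refine List.ext_getElem (by simp) (fun k h1 h2 => ?_)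
      simp [List.getElem_mapIdx]
    · simp
  | succ m ih =>
    rw [List.range_succ, List.foldl_append, ih, List.foldl_cons, List.foldl_nil]
    by_cases hv : vals[m]? = some r
    · rw [if_pos hv]
      refine Prod.ext ?_ ?_
      · show (probs.mapIdx _).set m _ = _
        by_cases hm : m < probs.length
        · have hget : ((probs.mapIdx (fun k x => if k < m ∧ vals[k]? = some r then x + 1 else x)).getD m 0) = probs[m] := by
            rw [List.getD_eq_getElem?_getD]
            simp [List.getElem?_mapIdx, List.getElem?_eq_getElem hm]
          rw [hget]
          refine List.ext_getElem (by simp) (fun k h1 h2 => ?_)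
          simp only [List.length_set, List.length_mapIdx] at h1
          rw [List.getElem_set]
          by_cases hk : m = k
          · subst hk
            simp [List.getElem_mapIdx, hv]
          · simp only [if_neg hk, List.getElem_mapIdx]
            have he : (k < m ∧ vals[k]? = some r) ↔ (k < m + 1 ∧ vals[k]? = some r) :=
              ⟨fun ⟨a, b⟩ => ⟨by omega, b⟩, fun ⟨a, b⟩ => ⟨by omega, b⟩⟩
            simp only [he]
        · rw [List.set_eq_of_length_le (by simp; omega)]
          refine List.ext_getElem (by simp) (fun k h1 h2 => ?_)
          simp only [List.length_mapIdx] at h1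
          simp only [List.getElem_mapIdx]
          have he : (k < m ∧ vals[k]? = some r) ↔ (k < m + 1 ∧ vals[k]? = some r) :=
            ⟨fun ⟨a, b⟩ => ⟨by omega, b⟩, fun ⟨a, b⟩ => ⟨by omega, b⟩⟩
          simp only [he]
      · have hex : (∃ i, i < m + 1 ∧ vals[i]? = some r) := ⟨m, by omega, hv⟩
        exact (decide_eq_true hex).symm
    · rw [if_neg hv]
      refine Prod.ext ?_ ?_
      · refine List.ext_getElem (by simp) (fun k h1 h2 => ?_)
        simp only [List.length_mapIdx] at h1
        simp only [List.getElem_mapIdx]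
        by_cases hk : k = m
        · subst hk; simp [hv]
        · have he : (k < m ∧ vals[k]? = some r) ↔ (k < m + 1 ∧ vals[k]? = some r) :=
            ⟨fun ⟨a, b⟩ => ⟨by omega, b⟩, fun ⟨a, b⟩ => ⟨by omega, b⟩⟩
          simp only [he]
      · simp only [decide_eq_decide]
        constructor
        · rintro ⟨i, hi, h⟩; exact ⟨i, by omega, h⟩
        · rintro ⟨i, hi, h⟩
          refine ⟨i, ?_, h⟩
          rcases Nat.lt_succ_iff_lt_or_eq.mp hi with h' | h'
          · exact h'
          · subst h'; exact absurd h hv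

theorem step_rel (probs vals : List Int) (d : PySem.Dict Int Int) (n : Int)
    (hlen : probs.length = vals.length) (hnd : vals.Nodup) (hit : d.items = vals.zip probs) :
    (aStep (probs, vals) n).1.length = (aStep (probs, vals) n).2.length ∧
    (aStep (probs, vals) n).2.Nodup ∧
    (cntStep d n).items = (aStep (probs, vals) n).2.zip (aStep (probs, vals) n).1 := by
  have hkeys : d.keys = vals := by
    simp only [PySem.Dict.keys, hit]
    exact List.map_fst_zip (le_of_eq hlen.symm)
  set r : Int := (PySem.Int.toChars n).foldl (fun acc digit => acc + pyDigitInt digit) 0 with hr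
  have hds : (PySem.Int.toChars n).foldl (fun acc digit => acc + pyDigitInt digit) 0 = r :=
    hr.symm
  have haS : aStep (probs, vals) n =
      (if (decide (∃ i, i < vals.length ∧ vals[i]? = some r)) = false then
        ((probs.mapIdx (fun k x => if k < vals.length ∧ vals[k]? = some r then x + 1 else x)) ++ [1], vals ++ [r])
      else (probs.mapIdx (fun k x => if k < vals.length ∧ vals[k]? = some r then x + 1 else x), vals)) := by
    unfold aStep
    simp only [hds, inner_char]
  by_cases hmem : r ∈ vals
  · have hex : ∃ i, i < vals.length ∧ vals[i]? = some r := by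
      obtain ⟨i, hi, e⟩ := List.mem_iff_getElem.mp hmem
      exact ⟨i, hi, by simp [List.getElem?_eq_getElem hi, e]⟩
    rw [haS, if_neg (by simp [hex])]
    refine ⟨by simp [hlen], hnd, ?_⟩
    have hco : d.contains r = true := by
      rw [PySem.Dict.contains_eq_decide_mem_keys, hkeys]; simp [hmem]
    show (d.insert r (d.getD r 0 + 1)).items = _
    rw [PySem.Dict.items_insert_of_contains d _ hco, hit]
    refine List.ext_getElem (by simp [hlen]) (fun k h1 h2 => ?_)
    have hkv : k < vals.length := by simp [hlen] at h1; omega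
    have hkp : k < probs.length := by omega
    simp only [List.getElem_map, List.getElem_zip, List.getElem_mapIdx]
    by_cases hk : vals[k] = r
    · have hmemit : (r, probs[k]) ∈ d.items := by
        have hkz : k < (vals.zip probs).length := by simp [List.length_zip]; omega
        have hmz := List.getElem_mem hkz
        rw [List.getElem_zip] at hmz
        rw [hit, ← hk]
        exact hmz
      have hknd : d.keys.Nodup := hkeys ▸ hnd
      have hg := PySem.Dict.getD_of_mem_items d hmemit hknd 0
      have hcond : k < vals.length ∧ vals[k]? = some r := ⟨hkv, by simp [List.getElem?_eq_getElem hkv, hk]⟩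
      simp [hk, hg, hcond]
    · have hcond : ¬(k < vals.length ∧ vals[k]? = some r) := by
        rintro ⟨-, e⟩
        exact hk (by simpa [List.getElem?_eq_getElem hkv] using e)
      simp [hk, hcond]
  · have hnex : ¬∃ i, i < vals.length ∧ vals[i]? = some r := by
      rintro ⟨i, hi, e⟩
      exact hmem (List.mem_of_getElem? e)
    have hP : probs.mapIdx (fun k x => if k < vals.length ∧ vals[k]? = some r then x + 1 else x) = probs := by
      refine List.ext_getElem (by simp) (fun k h1 h2 => ?_)
      simp only [List.getElem_mapIdx]
      have : ¬(k < vals.length ∧ vals[k]? = some r) := fun ⟨a, b⟩ => hnex ⟨k, a, b⟩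
      simp [this]
    rw [haS, if_pos (by simp [hnex]), hP]
    refine ⟨by simp [hlen], ?_, ?_⟩
    · simp [List.nodup_append, hnd]
      exact fun a ha h => hmem (h ▸ ha)
    · have hco : d.contains r = false := by
        rw [PySem.Dict.contains_eq_decide_mem_keys, hkeys]; simp [hmem]
      show (d.insert r (d.getD r 0 + 1)).items = _
      rw [PySem.Dict.items_insert_of_not_contains d _ hco, PySem.Dict.getD_of_not_contains d _ hco,
        hit, List.zip_append hlen.symm]
      norm_num

theorem loop_rel (ns : List Int) (probs vals : List Int) (d : PySem.Dict Int Int)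
    (hlen : probs.length = vals.length) (hnd : vals.Nodup) (hit : d.items = vals.zip probs) :
    (ns.foldl aStep (probs, vals)).1.length = (ns.foldl aStep (probs, vals)).2.length ∧
    (ns.foldl aStep (probs, vals)).2.Nodup ∧
    (ns.foldl cntStep d).items = (ns.foldl aStep (probs, vals)).2.zip (ns.foldl aStep (probs, vals)).1 := by
  induction ns generalizing probs vals d with
  | nil => exact ⟨hlen, hnd, hit⟩
  | cons n ns ih =>
    obtain ⟨h1, h2, h3⟩ := step_rel probs vals d n hlen hnd hit
    simpa using ih (aStep (probs, vals) n).1 (aStep (probs, vals) n).2 (cntStep d n) h1 h2 h3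

-- ---------- glue: A's counter equals B's digit DP, up to permutation of the pair list ----------

def sumsOf (p : Int) : List Int :=
  (PySem.List.pyRange 0 (p + 1) 1).map
    (fun r1 => (PySem.Int.toChars r1).foldl (fun acc digit => acc + pyDigitInt digit) 0)

theorem cnt_fold_eq_counter (p : Int) :
    (PySem.List.pyRange 0 (p + 1) 1).foldl cntStep PySem.Dict.empty
      = PySem.Dict.counter (sumsOf p) := by
  unfold sumsOf
  rw [← PySem.Dict.foldl_insert_getD_add_one_eq_counter, List.foldl_map]
  rfl

theorem count_sumsOf (p : Int) (hp : 0 ≤ p) (s : Int) :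
    (sumsOf p).count s = mN (p + 1).toNat s := by
  unfold sumsOf mN
  rw [show (p + 1 : Int) = (((p + 1).toNat : Nat) : Int) by omega, PySem.List.pyRange_zero_natCast,
    List.map_map, List.count_eq_countP, List.countP_map]
  apply List.countP_congr
  intro t _
  simp only [Function.comp, beq_iff_eq]
  rw [strDsum_eq ((t : Nat) : Int) (by positivity)]

theorem items_char (p : Int) (hp : 0 ≤ p) (s c : Int) :
    ((s, c) ∈ (bdist p).items ↔ (mN (p + 1).toNat s ≠ 0 ∧ c = (mN (p + 1).toNat s : Int))) := by
  obtain ⟨hnd, hch⟩ := CHAR ((p + 1).toNat) p le_rfl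
  obtain ⟨hgd, hco⟩ := hch s
  rw [← PySem.Dict.get?_eq_some_iff_mem_items _ _ _ hnd]
  constructor
  · intro hs
    have hct : (bdist p).contains s = true := by
      rw [PySem.Dict.contains_eq_isSome_get?, hs]; rfl
    refine ⟨hco.mp hct, ?_⟩
    have hcv : c = (bdist p).getD s 0 := by
      rw [PySem.Dict.getD_eq_get?_getD, hs]; rfl
    rw [hcv, hgd]
  · rintro ⟨hm, rfl⟩
    have hct : (bdist p).contains s = true := hco.mpr hm
    rw [PySem.Dict.contains_eq_isSome_get?] at hct
    obtain ⟨v, hv⟩ := Option.isSome_iff_exists.mp hct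
    have hvv : v = (bdist p).getD s 0 := by
      rw [PySem.Dict.getD_eq_get?_getD, hv]; rfl
    rw [hv, hvv, hgd]

theorem items_perm (p : Int) (hp : 0 ≤ p) :
    (bdist p).items.Perm
      ((PySem.Set.ofList (sumsOf p)).map (fun k => (k, ((sumsOf p).count k : Int)))) := by
  obtain ⟨hnd, -⟩ := CHAR ((p + 1).toNat) p le_rfl
  have hndI : (bdist p).items.Nodup := by
    refine List.Nodup.of_map Prod.fst ?_
    have hkeys : (bdist p).keys = (bdist p).items.map Prod.fst := by
      rw [PySem.Dict.keys.eq_1]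
    rw [← hkeys]
    exact hnd
  apply List.perm_of_nodup_nodup_toFinset_eq hndI
  · apply List.Nodup.map _ (PySem.Set.nodup_ofList _)
    intro a b hab
    simpa using congrArg Prod.fst hab
  · ext a
    rcases a with ⟨s, c⟩
    simp only [List.mem_toFinset, List.mem_map, PySem.Set.mem_ofList]
    rw [items_char p hp s c]
    constructor
    · rintro ⟨hm, rfl⟩
      refine ⟨s, ?_, by rw [count_sumsOf p hp s]⟩
      rw [← count_sumsOf p hp s] at hm
      exact List.count_pos_iff.mp (Nat.pos_of_ne_zero hm)
    · rintro ⟨k, hk, heq⟩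
      have hks : k = s := congrArg Prod.fst heq
      subst hks
      have hcc : ((sumsOf p).count k : Int) = c := congrArg Prod.snd heq
      have hcnt : (sumsOf p).count k ≠ 0 := Nat.pos_iff_ne_zero.mp (List.count_pos_iff.mpr hk)
      rw [count_sumsOf p hp k] at hcnt hcc
      exact ⟨hcnt, hcc.symm⟩

-- ===== VERDICT =====

theorem find_best_r_spec : Claim_equal_find_best_r := by
  intro p _ hpre
  unfold Spec_find_best_r find_best_r find_best_r_alt
  dsimp only
  obtain ⟨h1, h2, h3⟩ := loop_rel (PySem.List.pyRange 0 (p + 1) 1) [] [] PySem.Dict.empty rfl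
    List.nodup_nil rfl
  set st := (PySem.List.pyRange 0 (p + 1) 1).foldl aStep ([], []) with hst
  have hswap : st.1.zip st.2 = (st.2.zip st.1).map Prod.swap := (List.zip_swap st.2 st.1).symm
  rw [hswap, ← h3, cnt_fold_eq_counter p, PySem.Dict.items_counter]
  have hmapswap : ∀ l : List (Int × Int),
      l.map (fun sc : Int × Int => (sc.2, sc.1)) = l.map Prod.swap := fun l => rfl
  have hperm : (((PySem.Set.ofList (sumsOf p)).map
        (fun k => (k, ((sumsOf p).count k : Int)))).map Prod.swap).Perm
      (((bdist p).items).map (fun sc => (sc.2, sc.1))) := by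
    rw [hmapswap]
    exact ((items_perm p hpre).map Prod.swap).symm
  have hndB : (((bdist p).items).map (fun sc => (sc.2, sc.1))).Nodup := by
    obtain ⟨hnd, -⟩ := CHAR ((p + 1).toNat) p le_rfl
    have hndI : (bdist p).items.Nodup := by
      refine List.Nodup.of_map Prod.fst ?_
      have hkeys : (bdist p).keys = (bdist p).items.map Prod.fst := by
        rw [PySem.Dict.keys.eq_1]
      rw [← hkeys]
      exact hnd
    rw [hmapswap]
    exact hndI.map Prod.swap_injective
  exact congrArg (List.map Prod.snd) (sorted2_congr_perm _ _ hperm hndB)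

@[simp] theorem find_best_r_raises : Claim_raises_find_best_r := by
  unfold Claim_raises_find_best_r
  constructor
  · intro p _ hr hpre
    exact absurd hpre (by unfold Pre_find_best_r Raises_find_best_r at *; omega)
  · refine ⟨by decide, by decide, ?_⟩
    show (PySem.List.sorted2 ((bdist (-1)).items.map (fun sc => (sc.2, sc.1))) Prod.fst Prod.snd
      false).map Prod.snd = []
    rw [show bdist (-1) = PySem.Dict.empty from rfl]
    rfl
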